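-- pv_equiv track=rewrite | github.com/ann056/chat | chat.py | convert
-- ===== SOURCE A (Python) =====
-- def convert(chat):
-- 	new = [] # 用來分類的清單
-- 	people = None
-- 	for line in chat:
-- 		if line == 'Allen':
-- 			people = 'Allen'
-- 			continue
-- 		elif line == 'Tom':
-- 			people = 'Tom'
-- 			continue
-- 		if people:
-- 			new.append(people + ':' + line + '\n')
-- 	return new
-- ===== SOURCE B (Python) =====
-- def convert(chat):
--     out = []
--     n = len(chat)
--     i = 0
--     # skip leading lines before the first speaker name
--     while i < n and chat[i] != 'Allen' and chat[i] != 'Tom':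
--         i += 1
--     # boundary-then-segment traversal: at each speaker name, consume its segment
--     while i < n:
--         speaker = chat[i]
--         i += 1
--         while i < n and chat[i] != 'Allen' and chat[i] != 'Tom':
--             out.append(speaker + ':' + chat[i] + '\n')
--             i += 1
--     return out
-- ===== Notes on version B (the rewrite author's own statement) =====
-- stated objective: alternative
-- what changed: Replaces the flat stateful loop (an Option-like 'people' variable classifying every line) with a boundary-then-segment traversal: skip leading lines, then for each speaker name consume its whole segment of non-name lines in an inner loop.
import Mathlib
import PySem

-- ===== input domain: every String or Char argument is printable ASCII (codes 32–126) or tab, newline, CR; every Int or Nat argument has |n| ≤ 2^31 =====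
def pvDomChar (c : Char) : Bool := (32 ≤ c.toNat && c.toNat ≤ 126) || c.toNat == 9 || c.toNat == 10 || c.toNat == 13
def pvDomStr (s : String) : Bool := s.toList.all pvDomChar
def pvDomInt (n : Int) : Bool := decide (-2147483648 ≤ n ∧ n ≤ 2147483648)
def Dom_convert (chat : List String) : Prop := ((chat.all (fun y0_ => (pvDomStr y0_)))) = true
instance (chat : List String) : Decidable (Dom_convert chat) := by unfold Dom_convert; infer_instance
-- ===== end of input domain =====

-- B replaces A's flat stateful loop with a skip-then-segment traversal (different decomposition, same cost).


-- ===== PORT A =====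
-- A: one pass, a 'people' state (None until the first name) classifying every line.
def convert (chat : List String) : List String :=
  (chat.foldl (fun (st : Option String × List String) line =>
    if line = "Allen" then (some "Allen", st.2)
    else if line = "Tom" then (some "Tom", st.2)
    else match st.1 with
      | some p => (some p, st.2 ++ [p ++ ":" ++ line ++ "\n"])
      | none => st) (none, [])).2

-- ===== PORT B =====
-- skip leading lines before the first speaker name (B's first while loop)
def skipB : List String → List String
  | [] => []
  | l :: rest => if l ≠ "Allen" ∧ l ≠ "Tom" then skipB rest else l :: rest

-- inner while loop: consume one speaker's segment, return (emitted lines, remainder)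
def segB (sp : String) : List String → (List String × List String)
  | [] => ([], [])
  | l :: rest =>
      if l ≠ "Allen" ∧ l ≠ "Tom" then
        let r := segB sp rest
        ((sp ++ ":" ++ l ++ "\n") :: r.1, r.2)
      else ([], l :: rest)

theorem segB_len_le (sp : String) (xs : List String) : (segB sp xs).2.length ≤ xs.length := by
  induction xs with
  | nil => simp [segB]
  | cons l rest ih =>
      simp only [segB]
      split
      · simpa using Nat.le_succ_of_le ih
      · simp

-- outer while loop over the (speaker-headed) remainder
def mainB (out : List String) : List String → List String
  | [] => out
  | sp :: rest => mainB (out ++ (segB sp rest).1) (segB sp rest).2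
termination_by xs => xs.length
decreasing_by
  exact Nat.lt_succ_of_le (segB_len_le sp rest)

def convert_alt (chat : List String) : List String := mainB [] (skipB chat)

-- ===== PRECONDITION & SPEC =====
def Spec_convert (chat : List String) (out : List String) : Prop := out = convert_alt chat
instance (chat : List String) (out : List String) : Decidable (Spec_convert chat out) := by unfold Spec_convert; infer_instance

-- ===== CLAIM (what is proved, stated in full; the proofs are below) =====
def Claim_equal_convert : Prop := ∀ (chat : List String), Dom_convert chat → Spec_convert chat (convert chat)

-- ===== LEMMAS AND PROOFS =====

theorem mainB_out_aux (n : Nat) : ∀ (xs : List String), xs.length ≤ n →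
    ∀ out, mainB out xs = out ++ mainB [] xs := by
  induction n with
  | zero =>
      intro xs h out
      have hx : xs = [] := List.eq_nil_of_length_eq_zero (Nat.le_zero.mp h)
      subst hx; simp [mainB]
  | succ n ih =>
      intro xs h out
      cases xs with
      | nil => simp [mainB]
      | cons sp rest =>
          rw [mainB, mainB]
          have hr : (segB sp rest).2.length ≤ n :=
            le_trans (segB_len_le sp rest) (Nat.le_of_succ_le_succ h)
          rw [ih _ hr, ih _ hr ([] ++ (segB sp rest).1)]
          simp

theorem mainB_out (out xs : List String) : mainB out xs = out ++ mainB [] xs :=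
  mainB_out_aux xs.length xs le_rfl out

-- the step function of A's foldl, named for the lemmas
def stepA (st : Option String × List String) (line : String) : Option String × List String :=
  if line = "Allen" then (some "Allen", st.2)
  else if line = "Tom" then (some "Tom", st.2)
  else match st.1 with
    | some p => (some p, st.2 ++ [p ++ ":" ++ line ++ "\n"])
    | none => st

theorem convert_eq_stepA (chat : List String) :
    convert chat = (chat.foldl stepA (none, [])).2 := rfl

theorem stepA_Allen (st : Option String × List String) :
    stepA st "Allen" = (some "Allen", st.2) := by simp [stepA]

theorem stepA_Tom (st : Option String × List String) :
    stepA st "Tom" = (some "Tom", st.2) := by simp [stepA]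

theorem stepA_other_some (p : String) (acc : List String) (l : String)
    (hA : l ≠ "Allen") (hT : l ≠ "Tom") :
    stepA (some p, acc) l = (some p, acc ++ [p ++ ":" ++ l ++ "\n"]) := by
  simp [stepA, hA, hT]

theorem stepA_other_none (acc : List String) (l : String)
    (hA : l ≠ "Allen") (hT : l ≠ "Tom") :
    stepA (none, acc) l = (none, acc) := by simp [stepA, hA, hT]

theorem segB_name (sp l : String) (rest : List String) (h : l = "Allen" ∨ l = "Tom") :
    segB sp (l :: rest) = ([], l :: rest) := by
  unfold segB; rw [if_neg]; tauto

theorem segB_other (sp l : String) (rest : List String)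
    (hA : l ≠ "Allen") (hT : l ≠ "Tom") :
    segB sp (l :: rest) = ((sp ++ ":" ++ l ++ "\n") :: (segB sp rest).1, (segB sp rest).2) := by
  simp [segB, hA, hT]

theorem skipB_name (l : String) (rest : List String) (h : l = "Allen" ∨ l = "Tom") :
    skipB (l :: rest) = l :: rest := by
  unfold skipB; rw [if_neg]; tauto

theorem skipB_other (l : String) (rest : List String)
    (hA : l ≠ "Allen") (hT : l ≠ "Tom") :
    skipB (l :: rest) = skipB rest := by simp [skipB, hA, hT]

theorem foldA_some (chat : List String) : ∀ (p : String) (acc : List String),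
    (chat.foldl stepA (some p, acc)).2 = acc ++ (segB p chat).1 ++ mainB [] (segB p chat).2 := by
  induction chat with
  | nil => intro p acc; simp [segB, mainB]
  | cons l rest ih =>
      intro p acc
      by_cases hA : l = "Allen"
      · subst hA
        rw [List.foldl_cons, stepA_Allen, segB_name _ _ _ (Or.inl rfl), ih,
          mainB, mainB_out]
        simp
        exact (mainB_out _ _).symm
      · by_cases hT : l = "Tom"
        · subst hT
          rw [List.foldl_cons, stepA_Tom, segB_name _ _ _ (Or.inr rfl), ih,
            mainB, mainB_out]
          simp
          exact (mainB_out _ _).symm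
        · rw [List.foldl_cons, stepA_other_some _ _ _ hA hT, segB_other _ _ _ hA hT, ih]
          simp

theorem foldA_none (chat : List String) : ∀ (acc : List String),
    (chat.foldl stepA (none, acc)).2 = acc ++ mainB [] (skipB chat) := by
  induction chat with
  | nil => intro acc; simp [skipB, mainB]
  | cons l rest ih =>
      intro acc
      by_cases hA : l = "Allen"
      · subst hA
        rw [List.foldl_cons, stepA_Allen, skipB_name _ _ (Or.inl rfl), foldA_some,
          mainB, mainB_out]
        simp
        exact (mainB_out _ _).symm
      · by_cases hT : l = "Tom"
        · subst hT
          rw [List.foldl_cons, stepA_Tom, skipB_name _ _ (Or.inr rfl), foldA_some,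
            mainB, mainB_out]
          simp
          exact (mainB_out _ _).symm
        · rw [List.foldl_cons, stepA_other_none _ _ hA hT, skipB_other _ _ hA hT]
          exact ih acc

-- ===== VERDICT (by name: the statement is the Claim_ definition above) =====
theorem convert_spec : Claim_equal_convert := by
  intro chat _
  unfold Spec_convert convert_alt
  rw [convert_eq_stepA, foldA_none]
  simp
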